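-- pv_equiv track=rewrite | github.com/esix/competitive-programming | e-olymp/~contest-9716/B/main.py | solve
-- ===== SOURCE A (Python) =====
-- def get_char(s, i):
--     if i < 0: return 'X'
--     if i >= len(s): return 'X'
--     return s[i]
--
-- def solve(s):
--     result = 0
--     for i in range(len(s)):
--         c = get_char(s, i)
--         cp = get_char(s, i-1)
--         cn = get_char(s, i+1)
--         cnn = get_char(s, i+2)
--         if c == '-' and cp != 'S' and cn != 'S' and cn != 'B' and cnn != 'B':
--             result += 1
--     return result
-- ===== SOURCE B (Python) =====
-- def solve(s):
--     bad = set()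
--     for j, ch in enumerate(s):
--         if ch == 'S':
--             bad.add(j - 1)
--             bad.add(j + 1)
--         elif ch == 'B':
--             bad.add(j - 2)
--             bad.add(j - 1)
--     return sum(1 for i, ch in enumerate(s) if ch == '-' and i not in bad)
-- ===== Notes on version B (the rewrite author's own statement) =====
-- stated objective: alternative
-- what changed: Instead of testing four neighbors at every index, B first builds a set of excluded indices emitted by each 'S' (j-1, j+1) and each 'B' (j-2, j-1) marker, then counts the '-' positions not in that set; the per-dash neighbor inspection disappears.
import Mathlib
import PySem

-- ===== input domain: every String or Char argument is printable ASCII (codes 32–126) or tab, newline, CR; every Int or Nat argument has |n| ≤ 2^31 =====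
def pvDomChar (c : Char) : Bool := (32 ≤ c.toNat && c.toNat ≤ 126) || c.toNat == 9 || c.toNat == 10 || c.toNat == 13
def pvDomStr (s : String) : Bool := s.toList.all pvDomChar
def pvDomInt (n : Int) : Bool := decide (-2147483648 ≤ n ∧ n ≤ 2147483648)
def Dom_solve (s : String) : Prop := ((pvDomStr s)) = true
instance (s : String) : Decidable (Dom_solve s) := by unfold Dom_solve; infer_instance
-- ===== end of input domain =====

-- B replaces A's per-index four-neighbor test by a marker-driven exclusion set:
-- each 'S'/'B' emits the dash indices it forbids, then B counts unexcluded dashes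
-- (objective: alternative; same O(n) cost).

-- ===== PORT A =====
def getChar (l : List Char) (i : Int) : Char :=
  if i < 0 then 'X'
  else if i ≥ (l.length : Int) then 'X'
  else PySem.List.pyGetD l i 'X'  -- in-range s[i], exact here

def solve (s : String) : Int :=
  (PySem.List.pyRange 0 (s.toList.length : Int) 1).foldl (fun result i =>
    let c := getChar s.toList i
    let cp := getChar s.toList (i - 1)
    let cn := getChar s.toList (i + 1)
    let cnn := getChar s.toList (i + 2)
    if c = '-' ∧ cp ≠ 'S' ∧ cn ≠ 'S' ∧ cn ≠ 'B' ∧ cnn ≠ 'B' then result + 1 else result) 0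

-- ===== PORT B =====
-- the loop body building the exclusion set from one enumerated character
def pvEmit (bad : PySem.Set Int) (p : Int × Char) : PySem.Set Int :=
  if p.2 = 'S' then PySem.Set.add (PySem.Set.add bad (p.1 - 1)) (p.1 + 1)
  else if p.2 = 'B' then PySem.Set.add (PySem.Set.add bad (p.1 - 2)) (p.1 - 1)
  else bad

def solve_alt (s : String) : Int :=
  let cs := s.toList
  let bad : PySem.Set Int := (PySem.List.enumerate cs).foldl pvEmit PySem.Set.empty
  (PySem.List.enumerate cs).foldl (fun t p =>
    if p.2 = '-' ∧ p.1 ∉ bad then t + 1 else t) 0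

-- ===== PRECONDITION & SPEC =====
def Spec_solve (s : String) (out : Int) : Prop := out = solve_alt s
instance (s : String) (out : Int) : Decidable (Spec_solve s out) := by unfold Spec_solve; infer_instance

-- ===== CLAIM (what is proved, stated in full; the proofs are below) =====
def Claim_equal_solve : Prop := ∀ (s : String), Dom_solve s → Spec_solve s (solve s)

-- ===== LEMMAS AND PROOFS =====

-- membership in the exclusion set built by the fold
theorem pv_mem_emit (cs : List Char) (a : Int) (acc : PySem.Set Int) (x : Int) :
    x ∈ (PySem.List.enumerate cs a).foldl pvEmit acc ↔
      x ∈ acc ∨ ∃ (k : Nat) (h : k < cs.length),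
        (cs[k] = 'S' ∧ (x = a + k - 1 ∨ x = a + k + 1)) ∨
        (cs[k] = 'B' ∧ (x = a + k - 2 ∨ x = a + k - 1)) := by
  induction cs generalizing a acc with
  | nil => simp [PySem.List.enumerate_nil]
  | cons c cs ih =>
    rw [PySem.List.enumerate_cons, List.foldl_cons, ih]
    have hstep : x ∈ pvEmit acc (a, c) ↔
        x ∈ acc ∨ ((c = 'S' ∧ (x = a - 1 ∨ x = a + 1)) ∨ (c = 'B' ∧ (x = a - 2 ∨ x = a - 1))) := by
      unfold pvEmit
      by_cases hS : c = 'S'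
      · simp [hS, PySem.Set.mem_add]; tauto
      · by_cases hB : c = 'B'
        · simp [hB, PySem.Set.mem_add]; tauto
        · simp [hS, hB]
    rw [hstep]
    constructor
    · rintro (h | ⟨k, hk, hcond⟩)
      · rcases h with h | h
        · exact Or.inl h
        · refine Or.inr ⟨0, by simp, ?_⟩
          rcases h with ⟨h1, h2⟩ | ⟨h1, h2⟩
          · exact Or.inl ⟨by simpa using h1, by push_cast at h2 ⊢; omega⟩
          · exact Or.inr ⟨by simpa using h1, by push_cast at h2 ⊢; omega⟩
      · refine Or.inr ⟨k + 1, by simpa using hk, ?_⟩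
        rcases hcond with ⟨h1, h2⟩ | ⟨h1, h2⟩
        · exact Or.inl ⟨by simpa using h1, by push_cast at h2 ⊢; omega⟩
        · exact Or.inr ⟨by simpa using h1, by push_cast at h2 ⊢; omega⟩
    · rintro (h | ⟨k, hk, hcond⟩)
      · exact Or.inl (Or.inl h)
      · cases k with
        | zero =>
          refine Or.inl (Or.inr ?_)
          rcases hcond with ⟨h1, h2⟩ | ⟨h1, h2⟩
          · exact Or.inl ⟨by simpa using h1, by push_cast at h2 ⊢; omega⟩
          · exact Or.inr ⟨by simpa using h1, by push_cast at h2 ⊢; omega⟩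
        | succ j =>
          refine Or.inr ⟨j, by simpa using hk, ?_⟩
          rcases hcond with ⟨h1, h2⟩ | ⟨h1, h2⟩
          · exact Or.inl ⟨by simpa using h1, by push_cast at h2 ⊢; omega⟩
          · exact Or.inr ⟨by simpa using h1, by push_cast at h2 ⊢; omega⟩

theorem pv_getChar_in (cs : List Char) (k : Nat) (hk : k < cs.length) :
    getChar cs (k : Int) = cs.getD k 'X' := by
  unfold getChar
  rw [if_neg (by omega), if_neg (by omega), PySem.List.pyGetD_natCast]

theorem pv_getChar_out (cs : List Char) (i : Int) (h : i < 0 ∨ (cs.length : Int) ≤ i) :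
    getChar cs i = 'X' := by
  unfold getChar
  rcases h with h | h
  · rw [if_pos h]
  · rw [if_neg (by omega), if_pos (by omega)]

-- ===== VERDICT (by name) =====
theorem solve_spec : Claim_equal_solve := by
  intro s _
  simp only [Spec_solve, solve, solve_alt]
  set cs := s.toList with hcs
  set bad : PySem.Set Int := (PySem.List.enumerate cs).foldl pvEmit PySem.Set.empty with hbad
  -- reduce both folds to countP over List.range cs.length
  rw [PySem.List.pyRange_one]
  simp only [Int.sub_zero, Int.toNat_natCast]
  rw [PySem.List.enumerate_eq_map_pyRange cs 'X', PySem.List.pyRange_one]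
  simp only [Int.sub_zero, List.foldl_map]
  rw [PySem.List.foldl_ite_add_one, PySem.List.foldl_ite_add_one]
  congr 1
  congr 1
  apply List.countP_congr
  intro k hkmem
  have hk : k < cs.length := List.mem_range.mp hkmem
  simp only [zero_add]
  simp only [decide_eq_true_eq]
  -- characterise each neighbour of A
  have hc : getChar cs (k : Int) = cs.getD k 'X' := pv_getChar_in cs k hk
  have hget : PySem.List.pyGetD cs ((k : Int)) 'X' = cs.getD k 'X' :=
    PySem.List.pyGetD_natCast cs k 'X'
  have hcn : ∀ ch : Char, ch ≠ 'X' →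
      (getChar cs ((k : Int) + 1) = ch ↔ cs[k + 1]? = some ch) := by
    intro ch hch
    by_cases h1 : k + 1 < cs.length
    · have := pv_getChar_in cs (k + 1) h1
      push_cast at this
      simp [this, List.getD_eq_getElem?_getD, List.getElem?_eq_getElem h1]
    · have hx : getChar cs ((k : Int) + 1) = 'X' := by
        apply pv_getChar_out; right; omega
      simp [hx, List.getElem?_eq_none (by omega : cs.length ≤ k + 1), Ne.symm hch]
  have hcnn : (getChar cs ((k : Int) + 2) = 'B' ↔ cs[k + 2]? = some 'B') := by
    by_cases h2 : k + 2 < cs.length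
    · have := pv_getChar_in cs (k + 2) h2
      push_cast at this
      simp [this, List.getD_eq_getElem?_getD, List.getElem?_eq_getElem h2]
    · have hx : getChar cs ((k : Int) + 2) = 'X' := by
        apply pv_getChar_out; right; omega
      simp [hx, List.getElem?_eq_none (by omega : cs.length ≤ k + 2)]
  have hcp : (getChar cs ((k : Int) - 1) = 'S' ↔ ∃ j : Nat, j + 1 = k ∧ j < cs.length ∧ cs[j]! = 'S') := by
    cases k with
    | zero =>
      have hx : getChar cs (-1) = 'X' := by
        apply pv_getChar_out; left; norm_num
      simp [hx]
    | succ j =>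
      have hj : j < cs.length := by omega
      have := pv_getChar_in cs j hj
      have hcast : ((j + 1 : Nat) : Int) - 1 = (j : Int) := by push_cast; ring
      rw [hcast, this]
      constructor
      · intro h
        exact ⟨j, rfl, hj, by simp [List.getD_eq_getElem?_getD, List.getElem?_eq_getElem hj] at h ⊢; simpa [List.getElem!_eq_getElem?_getD, List.getElem?_eq_getElem hj] using h⟩
      · rintro ⟨j', hj1, hj2, hj3⟩
        have : j' = j := by omega
        subst this
        simpa [List.getD_eq_getElem?_getD, List.getElem!_eq_getElem?_getD, List.getElem?_eq_getElem hj2] using hj3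
  -- characterise membership in bad at index k
  have hbadmem : ((k : Int) ∈ bad) ↔
      (cs[k + 1]? = some 'S' ∨ (∃ j : Nat, j + 1 = k ∧ j < cs.length ∧ cs[j]! = 'S')
        ∨ cs[k + 2]? = some 'B' ∨ cs[k + 1]? = some 'B') := by
    rw [hbad, pv_mem_emit]
    simp only [show ∀ y : Int, (y ∈ (PySem.Set.empty : PySem.Set Int)) ↔ False from fun y => by
      simp [PySem.Set.empty], false_or]
    constructor
    · rintro ⟨m, hm, hcond⟩
      rcases hcond with ⟨hch, heq | heq⟩ | ⟨hch, heq | heq⟩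
      · -- S, k = m - 1 → m = k + 1
        have : m = k + 1 := by omega
        subst this
        exact Or.inl (by simp [List.getElem?_eq_getElem hm, hch])
      · -- S, k = m + 1
        have hm1 : m + 1 = k := by omega
        exact Or.inr (Or.inl ⟨m, hm1, hm, by simp [List.getElem!_eq_getElem?_getD, List.getElem?_eq_getElem hm, hch]⟩)
      · -- B, k = m - 2 → m = k + 2
        have : m = k + 2 := by omega
        subst this
        exact Or.inr (Or.inr (Or.inl (by simp [List.getElem?_eq_getElem hm, hch])))
      · -- B, k = m - 1 → m = k + 1
        have : m = k + 1 := by omega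
        subst this
        exact Or.inr (Or.inr (Or.inr (by simp [List.getElem?_eq_getElem hm, hch])))
    · rintro (h | ⟨j, hj1, hj2, hj3⟩ | h | h)
      · have hlen : k + 1 < cs.length := by
          by_contra hc'; simp [List.getElem?_eq_none (by omega : cs.length ≤ k + 1)] at h
        refine ⟨k + 1, hlen, Or.inl ⟨?_, Or.inl (by push_cast; ring)⟩⟩
        simpa [List.getElem?_eq_getElem hlen] using h
      · refine ⟨j, hj2, Or.inl ⟨?_, Or.inr (by omega)⟩⟩
        simpa [List.getElem!_eq_getElem?_getD, List.getElem?_eq_getElem hj2] using hj3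
      · have hlen : k + 2 < cs.length := by
          by_contra hc'; simp [List.getElem?_eq_none (by omega : cs.length ≤ k + 2)] at h
        refine ⟨k + 2, hlen, Or.inr ⟨?_, Or.inl (by push_cast; ring)⟩⟩
        simpa [List.getElem?_eq_getElem hlen] using h
      · have hlen : k + 1 < cs.length := by
          by_contra hc'; simp [List.getElem?_eq_none (by omega : cs.length ≤ k + 1)] at h
        refine ⟨k + 1, hlen, Or.inr ⟨?_, Or.inr (by push_cast; ring)⟩⟩
        simpa [List.getElem?_eq_getElem hlen] using h
  constructor
  · rintro ⟨h1, h2, h3, h4, h5⟩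
    refine ⟨by rw [hget]; rw [hc] at h1; exact h1, ?_⟩
    rw [hbadmem]
    rintro (hS | hP | hB2 | hB1)
    · exact h3 ((hcn 'S' (by decide)).mpr hS)
    · exact h2 (hcp.mpr hP)
    · exact h5 (hcnn.mpr hB2)
    · exact h4 ((hcn 'B' (by decide)).mpr hB1)
  · rintro ⟨h1, h2⟩
    rw [hbadmem] at h2
    refine ⟨by rw [hc]; rw [hget] at h1; exact h1, ?_, ?_, ?_, ?_⟩
    · intro h; exact h2 (Or.inr (Or.inl (hcp.mp h)))
    · intro h; exact h2 (Or.inl ((hcn 'S' (by decide)).mp h))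
    · intro h; exact h2 (Or.inr (Or.inr (Or.inr ((hcn 'B' (by decide)).mp h))))
    · intro h; exact h2 (Or.inr (Or.inr (Or.inl (hcnn.mp h))))
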